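-- pv_equiv track=rewrite | github.com/Yairsep-zz/Freespeak_v2 | src/Backend/Evaluation/Feedback/VoiceEmotionsFeedback.py | findAllIndices
-- ===== SOURCE A (Python) =====
-- def findAllIndices(color_number):
--     maxVal = -1
--     positionsMaxVal = []
--     for i in range(len(color_number)):
--         if maxVal <= color_number[i]:
--             maxVal = color_number[i]
--             positionsMaxVal.append(i)
--     return positionsMaxVal
-- ===== SOURCE B (Python) =====
-- def findAllIndices(color_number):
--     # Pass 1: prefix-maximum table; prefix[i] = max of -1 and all elements before index i.
--     prefix = [-1]
--     for v in color_number: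
--         prefix.append(max(prefix[-1], v))
--     # Pass 2: select the indices whose element reaches its prefix maximum.
--     return [i for i, v in enumerate(color_number) if prefix[i] <= v]
-- ===== Notes on version B (the rewrite author's own statement) =====
-- stated objective: alternative
-- what changed: Replaces the single fused scan carrying (running max, result) with two passes: first build a prefix-maximum table seeded with -1, then a separate enumerate-filter pass selecting indices whose element reaches its prefix maximum.
import Mathlib
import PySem

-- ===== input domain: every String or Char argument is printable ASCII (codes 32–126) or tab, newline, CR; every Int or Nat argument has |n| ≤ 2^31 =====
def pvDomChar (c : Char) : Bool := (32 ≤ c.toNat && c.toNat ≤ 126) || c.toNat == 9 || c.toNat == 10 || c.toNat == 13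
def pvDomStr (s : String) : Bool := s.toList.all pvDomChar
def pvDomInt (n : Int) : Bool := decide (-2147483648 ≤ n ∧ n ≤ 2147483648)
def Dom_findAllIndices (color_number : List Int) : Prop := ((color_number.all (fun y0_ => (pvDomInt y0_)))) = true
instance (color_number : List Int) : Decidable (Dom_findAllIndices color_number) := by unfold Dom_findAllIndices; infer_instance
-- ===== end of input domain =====

-- B replaces A's fused scan by a prefix-maximum table pass plus a separate selection pass (alternative decomposition, same cost).

-- ===== PORT A =====
-- single scan carrying (maxVal, positionsMaxVal), indexing via range(len(...))
def findAllIndices (color_number : List Int) : List Int :=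
  ((PySem.List.pyRange 0 color_number.length 1).foldl
    (fun (st : Int × List Int) i =>
      if st.1 ≤ PySem.List.pyGetD color_number i 0 then
        (PySem.List.pyGetD color_number i 0, st.2 ++ [i])
      else st)
    (-1, [])).2

-- ===== PORT B =====
-- pass 1: prefix-maximum table seeded with -1 (prefix[-1] lookup = last element)
-- pass 2: enumerate-filter selecting indices whose element reaches its prefix maximum
def findAllIndices_alt (color_number : List Int) : List Int :=
  let pre := color_number.foldl
    (fun acc v => acc ++ [max (PySem.List.pyGetD acc (-1) 0) v]) [-1]
  (PySem.List.enumerate color_number).filterMap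
    (fun p => if PySem.List.pyGetD pre p.1 0 ≤ p.2 then some p.1 else none)

-- ===== PRECONDITION & SPEC =====
def Spec_findAllIndices (color_number : List Int) (out : List Int) : Prop := out = findAllIndices_alt color_number
instance (color_number : List Int) (out : List Int) : Decidable (Spec_findAllIndices color_number out) := by unfold Spec_findAllIndices; infer_instance

-- ===== CLAIM (what is proved, stated in full; the proofs are below) =====
def Claim_equal_findAllIndices : Prop := ∀ (color_number : List Int), Dom_findAllIndices color_number → Spec_findAllIndices color_number (findAllIndices color_number)

-- ===== LEMMAS AND PROOFS =====

-- reference recursion: running-max selection over (index, value) pairs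
def pvRef (m : Int) : List (Int × Int) → List Int
  | [] => []
  | (i, v) :: t => if m ≤ v then i :: pvRef v t else pvRef m t

-- tail of the prefix-maximum table for xs with seed m
def pvScan (m : Int) : List Int → List Int
  | [] => []
  | v :: t => max m v :: pvScan (max m v) t

theorem pvA_foldl (ps : List (Int × Int)) (m : Int) (acc : List Int) :
    (ps.foldl (fun (st : Int × List Int) p =>
        if st.1 ≤ p.2 then (p.2, st.2 ++ [p.1]) else st) (m, acc)).2
      = acc ++ pvRef m ps := by
  induction ps generalizing m acc with
  | nil => simp [pvRef]
  | cons p t ih =>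
    obtain ⟨i, v⟩ := p
    by_cases h : m ≤ v <;> simp [pvRef, h, ih, List.append_assoc]

theorem pvPrefix_foldl (xs : List Int) (acc : List Int) (h : acc ≠ []) :
    xs.foldl (fun acc v => acc ++ [max (PySem.List.pyGetD acc (-1) 0) v]) acc
      = acc ++ pvScan (acc.getLast h) xs := by
  induction xs generalizing acc with
  | nil => simp [pvScan]
  | cons v t ih =>
    simp only [List.foldl_cons]
    rw [PySem.List.pyGetD_neg_one (h := h)]
    rw [ih (acc ++ [max (acc.getLast h) v]) (by simp)]
    simp [pvScan, List.append_assoc]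

theorem pvB_filter (xs : List Int) (m s : Int) :
    (PySem.List.enumerate xs s).filterMap
      (fun p => if PySem.List.pyGetD (m :: pvScan m xs) (p.1 - s) 0 ≤ p.2 then some p.1 else none)
      = pvRef m (PySem.List.enumerate xs s) := by
  induction xs generalizing m s with
  | nil => simp [PySem.List.enumerate_nil, pvRef]
  | cons v t ih =>
    rw [PySem.List.enumerate_cons]
    simp only [List.filterMap_cons]
    have hhead : PySem.List.pyGetD (m :: pvScan m (v :: t)) ((s : Int) - s) 0 = m := by
      simp [PySem.List.pyGetD_zero_cons, sub_self]
    have htail :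
        (PySem.List.enumerate t (s + 1)).filterMap
          (fun p => if PySem.List.pyGetD (m :: pvScan m (v :: t)) (p.1 - s) 0 ≤ p.2 then some p.1 else none)
          = pvRef (max m v) (PySem.List.enumerate t (s + 1)) := by
      rw [← ih (max m v) (s + 1)]
      apply List.filterMap_congr
      intro p hp
      have hge : s + 1 ≤ p.1 := by
        rcases (PySem.List.mem_enumerate_iff _ _ _).1 hp with ⟨k, hk, rfl⟩
        simp
      have hidx : PySem.List.pyGetD (m :: pvScan m (v :: t)) (p.1 - s) 0
          = PySem.List.pyGetD (max m v :: pvScan (max m v) t) (p.1 - (s + 1)) 0 := by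
        have h1 : (0:Int) ≤ p.1 - s - 1 := by omega
        rw [PySem.List.pyGetD_of_nonneg _ _ (by omega : (0:Int) ≤ p.1 - s),
            PySem.List.pyGetD_of_nonneg _ _ (by omega : (0:Int) ≤ p.1 - (s + 1))]
        have h2 : (p.1 - s).toNat = (p.1 - (s + 1)).toNat + 1 := by omega
        rw [h2]
        simp [pvScan]
      rw [hidx]
    rw [htail]
    by_cases h : m ≤ v
    · have hm : max m v = v := by omega
      rw [hhead, hm]
      simp [pvRef, h]
    · have hm : max m v = m := by omega
      rw [hhead, hm]
      simp [pvRef, h]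

theorem pvA_enum (xs : List Int) :
    ((PySem.List.pyRange 0 (xs.length : Int) 1).foldl
      (fun (st : Int × List Int) i =>
        if st.1 ≤ PySem.List.pyGetD xs i 0 then (PySem.List.pyGetD xs i 0, st.2 ++ [i]) else st)
      (-1, [])).2 = pvRef (-1) (PySem.List.enumerate xs 0) := by
  have hfold := pvA_foldl (PySem.List.enumerate xs 0) (-1) []
  rw [List.nil_append] at hfold
  rw [← hfold]
  have hlen : ((xs.length : Int)) = PySem.List.len xs := by simp
  rw [hlen, PySem.List.enumerate_eq_map_pyRange xs 0, List.foldl_map]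

theorem pv_ports_eq (xs : List Int) : findAllIndices xs = findAllIndices_alt xs := by
  simp only [findAllIndices, findAllIndices_alt]
  rw [pvPrefix_foldl xs [-1] (by simp)]
  have hB := pvB_filter xs (-1) 0
  simp only [sub_zero] at hB
  simp only [List.getLast_singleton, List.singleton_append]
  rw [pvA_enum]
  exact hB.symm

-- ===== VERDICT (by name: the statement is the Claim_ definition above) =====
theorem findAllIndices_spec : Claim_equal_findAllIndices := by
  intro xs _
  unfold Spec_findAllIndices
  exact pv_ports_eq xs
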